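-- pv_equiv track=rewrite | github.com/ffastIA/PlanejamentoTurmas | otimizador/utils.py | calcular_meses_ativos
-- ===== SOURCE A (Python) =====
-- def calcular_meses_ativos(mes_inicio: int,
--                           duracao: int,
--                           meses_ferias_idx: list,
--                           num_meses_total: int) -> list:
--     """
--     Calcula os meses de calendário em que uma turma está ativa ACADEMICAMENTE (pulando férias).
--     """
--     meses_ativos = []
--     meses_letivos_contados = 0
--     mes_calendario_atual = mes_inicio
--
--     while meses_letivos_contados < duracao and mes_calendario_atual < num_meses_total:
--         if mes_calendario_atual not in meses_ferias_idx:
--             meses_ativos.append(mes_calendario_atual)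
--             meses_letivos_contados += 1
--         mes_calendario_atual += 1
--
--     return meses_ativos
-- ===== SOURCE B (Python) =====
-- def calcular_meses_ativos(mes_inicio: int,
--                           duracao: int,
--                           meses_ferias_idx: list,
--                           num_meses_total: int) -> list:
--     if duracao <= 0:
--         return []
--     fer = sorted({f for f in meses_ferias_idx
--                   if mes_inicio <= f < num_meses_total})
--     res = []
--     need = duracao
--     start = mes_inicio
--     for f in fer + [num_meses_total]:
--         seg = min(f - start, need)
--         if seg > 0:
--             res.extend(range(start, start + seg))
--             need -= seg
--             if need == 0:
--                 break
--         start = f + 1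
--     return res
-- ===== Notes on version B (the rewrite author's own statement) =====
-- stated objective: alternative
-- what changed: Replaces A's month-by-month counter loop over the calendar with a segment algorithm: sort the distinct vacation months inside the window and emit whole runs of consecutive months between vacations, truncating at duracao, so the loop runs per vacation segment rather than per calendar month.
import Mathlib
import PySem

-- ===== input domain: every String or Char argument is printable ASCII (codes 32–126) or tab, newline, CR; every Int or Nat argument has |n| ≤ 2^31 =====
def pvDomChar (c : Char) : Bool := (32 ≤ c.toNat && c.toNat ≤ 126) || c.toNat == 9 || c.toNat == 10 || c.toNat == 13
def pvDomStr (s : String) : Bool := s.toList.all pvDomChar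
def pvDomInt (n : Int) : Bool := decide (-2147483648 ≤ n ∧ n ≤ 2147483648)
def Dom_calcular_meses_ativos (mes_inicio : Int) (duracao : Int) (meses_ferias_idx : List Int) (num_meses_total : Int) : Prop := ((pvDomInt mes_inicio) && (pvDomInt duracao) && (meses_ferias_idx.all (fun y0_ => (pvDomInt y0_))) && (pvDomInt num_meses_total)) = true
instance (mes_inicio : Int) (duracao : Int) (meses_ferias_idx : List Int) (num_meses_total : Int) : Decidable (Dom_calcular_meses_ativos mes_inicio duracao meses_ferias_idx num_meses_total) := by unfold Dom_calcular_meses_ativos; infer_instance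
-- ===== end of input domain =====

-- B replaces A's month-by-month counter loop with a segment algorithm: sort the distinct vacation
-- months inside the window and emit whole runs of months between consecutive vacations.

-- ===== PORT A =====
-- the while loop of A: state = (meses_ativos, meses_letivos_contados, mes_calendario_atual)
def pvLoopA (duracao num_meses_total : Int) (meses_ferias_idx : List Int)
    (meses_ativos : List Int) (meses_letivos_contados mes_calendario_atual : Int) : List Int :=
  if h : meses_letivos_contados < duracao ∧ mes_calendario_atual < num_meses_total then
    if meses_ferias_idx.contains mes_calendario_atual then
      pvLoopA duracao num_meses_total meses_ferias_idx meses_ativos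
        meses_letivos_contados (mes_calendario_atual + 1)
    else
      pvLoopA duracao num_meses_total meses_ferias_idx (meses_ativos ++ [mes_calendario_atual])
        (meses_letivos_contados + 1) (mes_calendario_atual + 1)
  else
    meses_ativos
termination_by (num_meses_total - mes_calendario_atual).toNat
decreasing_by all_goals omega

def calcular_meses_ativos (mes_inicio : Int) (duracao : Int) (meses_ferias_idx : List Int) (num_meses_total : Int) : List Int :=
  pvLoopA duracao num_meses_total meses_ferias_idx [] 0 mes_inicio

-- ===== PORT B =====
-- the for loop of B over fer + [num_meses_total]: state = (res, need, start)
def pvLoopB (res : List Int) (need start : Int) : List Int → List Int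
  | [] => res
  | f :: rest =>
    let seg := min (f - start) need
    if 0 < seg then
      if need - seg = 0 then res ++ PySem.List.pyRange start (start + seg) 1
      else pvLoopB (res ++ PySem.List.pyRange start (start + seg) 1) (need - seg) (f + 1) rest
    else pvLoopB res need (f + 1) rest

def calcular_meses_ativos_alt (mes_inicio : Int) (duracao : Int) (meses_ferias_idx : List Int) (num_meses_total : Int) : List Int :=
  if duracao ≤ 0 then []
  else
    -- fer = sorted({f for f in meses_ferias_idx if mes_inicio <= f < num_meses_total})
    let fer := PySem.List.sorted
      (PySem.Set.ofList (meses_ferias_idx.filter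
        (fun f => decide (mes_inicio ≤ f) && decide (f < num_meses_total))))
      (fun x => x)
    pvLoopB [] duracao mes_inicio (fer ++ [num_meses_total])

-- ===== PRECONDITION & SPEC =====
def Spec_calcular_meses_ativos (mes_inicio : Int) (duracao : Int) (meses_ferias_idx : List Int) (num_meses_total : Int) (out : List Int) : Prop := out = calcular_meses_ativos_alt mes_inicio duracao meses_ferias_idx num_meses_total
instance (mes_inicio : Int) (duracao : Int) (meses_ferias_idx : List Int) (num_meses_total : Int) (out : List Int) : Decidable (Spec_calcular_meses_ativos mes_inicio duracao meses_ferias_idx num_meses_total out) := by unfold Spec_calcular_meses_ativos; infer_instance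

-- ===== CLAIM (what is proved, stated in full; the proofs are below) =====
def Claim_equal_calcular_meses_ativos : Prop := ∀ (mes_inicio : Int) (duracao : Int) (meses_ferias_idx : List Int) (num_meses_total : Int), Dom_calcular_meses_ativos mes_inicio duracao meses_ferias_idx num_meses_total → Spec_calcular_meses_ativos mes_inicio duracao meses_ferias_idx num_meses_total (calcular_meses_ativos mes_inicio duracao meses_ferias_idx num_meses_total)

-- ===== LEMMAS AND PROOFS =====

-- A's loop returns the accumulator followed by the first (dur - cnt) non-vacation months of the
-- remaining window [cur, total).
theorem pvLoopA_eq (dur total : Int) (ferias acc : List Int) (cnt cur : Int) :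
    pvLoopA dur total ferias acc cnt cur =
      acc ++ ((PySem.List.pyRange cur total 1).filter
        (fun m => !(ferias.contains m))).take (dur - cnt).toNat := by
  fun_induction pvLoopA dur total ferias acc cnt cur with
  | case1 acc cnt cur h hf ih =>
      rw [ih, PySem.List.pyRange_one_cons h.2]
      have hm : cur ∈ ferias := by simpa using hf
      simp [hm]
  | case2 acc cnt cur h hf ih =>
      rw [ih, PySem.List.pyRange_one_cons h.2]
      have hm : cur ∉ ferias := by simpa using hf
      have : (dur - cnt).toNat = (dur - (cnt + 1)).toNat + 1 := by omega
      simp [hm, this]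
  | case3 acc cnt cur h =>
      rcases not_and_or.mp h with h1 | h2
      · have : (dur - cnt).toNat = 0 := by omega
        simp [this]
      · have : PySem.List.pyRange cur total 1 = [] := by
          rw [PySem.List.pyRange_one]
          have : (total - cur).toNat = 0 := by omega
          simp [this]
        simp [this]

-- a take of a range of consecutive integers is again such a range
theorem take_pyRange (a b : Int) (n : Nat) :
    (PySem.List.pyRange a b 1).take n = PySem.List.pyRange a (min (a + n) b) 1 := by
  rw [PySem.List.pyRange_one, PySem.List.pyRange_one, ← List.map_take, List.take_range]
  have : min n (b - a).toNat = (min (a + n) b - a).toNat := by omega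
  rw [this]

-- B's loop invariant: given the sentinel-terminated, strictly increasing list 'fer' of exactly the
-- vacation months of [start, total), the loop appends the first 'need' non-vacation months of that
-- window to 'res'.
theorem pvLoopB_eq (ferias : List Int) (total : Int) (fer : List Int) :
    ∀ (res : List Int) (need start : Int),
      0 < need →
      (fer ++ [total]).Pairwise (· < ·) →
      (∀ f ∈ fer, start ≤ f) →
      (∀ m : Int, start ≤ m → m < total → (m ∈ ferias ↔ m ∈ fer)) →
      pvLoopB res need start (fer ++ [total]) =
        res ++ (((PySem.List.pyRange start total 1).filter
          (fun m => !(ferias.contains m))).take need.toNat) := by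
  induction fer with
  | nil =>
      intro res need start hneed _ _ hmem
      have hfil : (PySem.List.pyRange start total 1).filter (fun m => !(ferias.contains m))
          = PySem.List.pyRange start total 1 := by
        apply List.filter_eq_self.mpr
        intro m hm
        have hw := (PySem.List.mem_pyRange_one).mp hm
        have : m ∉ ferias := fun hin => by simpa using (hmem m hw.1 hw.2).mp hin
        simpa using this
      rw [hfil]
      simp only [List.nil_append, pvLoopB]
      by_cases hseg : 0 < min (total - start) need
      · simp only [if_pos hseg]
        by_cases hz : need - min (total - start) need = 0
        · -- need ≤ total - start : take need months and stop
          have h1 : min (total - start) need = need := by omega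
          rw [if_pos hz, h1, take_pyRange]
          have : min (start + need.toNat) total = start + need := by omega
          rw [this]
        · -- the window is exhausted first: emit it all, loop ends at []
          have h1 : min (total - start) need = total - start := by omega
          rw [if_neg hz, h1]
          have hlen : (PySem.List.pyRange start total 1).length ≤ need.toNat := by
            rw [PySem.List.length_pyRange_one]; omega
          rw [List.take_of_length_le hlen]
          have : start + (total - start) = total := by omega
          rw [this]
      · -- empty window
        simp only [if_neg hseg]
        have : PySem.List.pyRange start total 1 = [] := by
          rw [PySem.List.pyRange_one]
          have : (total - start).toNat = 0 := by omega
          simp [this]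
        simp [this]
  | cons f rest ih =>
      intro res need start hneed hpw hge hmem
      have hpw' : (rest ++ [total]).Pairwise (· < ·) := (List.pairwise_cons.mp hpw).2
      have hflt : ∀ g ∈ rest ++ [total], f < g := (List.pairwise_cons.mp hpw).1
      have hftot : f < total := hflt total (by simp)
      have hsf : start ≤ f := hge f (by simp)
      -- split the window at f and filter
      have hsplit : PySem.List.pyRange start total 1
          = PySem.List.pyRange start f 1 ++ (f :: PySem.List.pyRange (f + 1) total 1) := by
        rw [PySem.List.pyRange_one_append start f total hsf (le_of_lt hftot),
            PySem.List.pyRange_one_cons hftot]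
      have hkept : (PySem.List.pyRange start f 1).filter (fun m => !(ferias.contains m))
          = PySem.List.pyRange start f 1 := by
        apply List.filter_eq_self.mpr
        intro m hm
        have hw := (PySem.List.mem_pyRange_one).mp hm
        have hmf : m ∉ ferias := by
          intro hin
          have := (hmem m hw.1 (lt_trans hw.2 hftot)).mp hin
          rcases List.mem_cons.mp this with h | h
          · omega
          · exact absurd (hflt m (by simp [h])) (by omega)
        simpa using hmf
      have hfin : f ∈ ferias := (hmem f hsf hftot).mpr (by simp)
      have hfil : (PySem.List.pyRange start total 1).filter (fun m => !(ferias.contains m))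
          = PySem.List.pyRange start f 1 ++
            (PySem.List.pyRange (f + 1) total 1).filter (fun m => !(ferias.contains m)) := by
        rw [hsplit, List.filter_append, hkept, List.filter_cons]
        simp [hfin]
      have hmem' : ∀ m : Int, f + 1 ≤ m → m < total → (m ∈ ferias ↔ m ∈ rest) := by
        intro m h1 h2
        rw [hmem m (by omega) h2]
        constructor
        · intro h; rcases List.mem_cons.mp h with h | h
          · omega
          · exact h
        · intro h; exact List.mem_cons.mpr (Or.inr h)
      have hge' : ∀ g ∈ rest, f + 1 ≤ g := by
        intro g hg; have := hflt g (List.mem_append.mpr (Or.inl hg)); omega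
      have hlenpre : (PySem.List.pyRange start f 1).length = (f - start).toNat := by
        rw [PySem.List.length_pyRange_one]
      rw [hfil]
      simp only [List.cons_append, pvLoopB]
      by_cases hseg : 0 < min (f - start) need
      · simp only [if_pos hseg]
        by_cases hz : need - min (f - start) need = 0
        · -- need ≤ f - start : done inside the first free run
          have h1 : min (f - start) need = need := by omega
          rw [if_pos hz, h1, List.take_append]
          have h2 : need.toNat - (PySem.List.pyRange start f 1).length = 0 := by
            rw [hlenpre]; omega
          rw [h2, take_pyRange]
          have : min (start + need.toNat) f = start + need := by omega
          rw [this]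
          simp
        · -- emit the whole run [start, f), skip f, continue
          have h1 : min (f - start) need = f - start := by omega
          rw [if_neg hz, h1]
          have hrec := ih (res ++ PySem.List.pyRange start (start + (f - start)) 1)
            (need - (f - start)) (f + 1) (by omega) hpw' hge' hmem'
          rw [hrec, List.take_append]
          have hlenle : (PySem.List.pyRange start f 1).length ≤ need.toNat := by
            rw [hlenpre]; omega
          rw [List.take_of_length_le hlenle]
          have e1 : start + (f - start) = f := by omega
          have e2 : need.toNat - (PySem.List.pyRange start f 1).length
              = (need - (f - start)).toNat := by rw [hlenpre]; omega
          rw [e1, e2, List.append_assoc]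
      · -- f = start : no free month before f, skip it
        have hf0 : f = start := by omega
        simp only [if_neg hseg]
        have hrec := ih res need (f + 1) hneed hpw' hge' hmem'
        rw [hrec]
        have : PySem.List.pyRange start f 1 = [] := by
          rw [PySem.List.pyRange_one]
          have : (f - start).toNat = 0 := by omega
          simp [this]
        rw [this]
        simp

-- ===== VERDICT (by name: the statement is the Claim_ definition above) =====
theorem calcular_meses_ativos_spec : Claim_equal_calcular_meses_ativos := by
  intro mi dur ferias total _
  unfold Spec_calcular_meses_ativos calcular_meses_ativos calcular_meses_ativos_alt
  rw [pvLoopA_eq]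
  by_cases hd : dur ≤ 0
  · simp [hd]
  · simp only [if_neg hd]
    set flt := ferias.filter (fun f => decide (mi ≤ f) && decide (f < total)) with hflt
    set fer := PySem.List.sorted (PySem.Set.ofList flt) (fun x => x) with hfer
    have hmemfer : ∀ m : Int, m ∈ fer ↔ (m ∈ ferias ∧ mi ≤ m ∧ m < total) := by
      intro m
      rw [hfer, PySem.List.mem_sorted, PySem.Set.mem_ofList, hflt, List.mem_filter]
      simp
    have hpwfer : fer.Pairwise (· < ·) := PySem.List.sorted_ofList_pairwise_lt flt
    have hpw : (fer ++ [total]).Pairwise (· < ·) := by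
      rw [List.pairwise_append]
      refine ⟨hpwfer, by simp, ?_⟩
      intro a ha b hb
      have := (hmemfer a).mp ha
      simp at hb
      omega
    have hge : ∀ f ∈ fer, mi ≤ f := fun f hf => ((hmemfer f).mp hf).2.1
    have hmem : ∀ m : Int, mi ≤ m → m < total → (m ∈ ferias ↔ m ∈ fer) := by
      intro m h1 h2
      rw [hmemfer]
      exact ⟨fun h => ⟨h, h1, h2⟩, fun h => h.1⟩
    rw [pvLoopB_eq ferias total fer [] dur mi (by omega) hpw hge hmem]
    simp
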